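-- pv_equiv track=rewrite | github.com/SankaiAI/iheardai-data-pipeline | etl/transform/marketo_transformer.py | categorize_activity
-- ===== SOURCE A (Python) =====
-- def categorize_activity(activity_type_id: int) -> str:
--     """Categorize activity into broad types"""
--     categories = {
--         'email': [6, 7, 8, 9, 10, 11],      # Email activities
--         'web': [1, 3],                       # Web activities
--         'form': [2],                         # Form fills
--         'content': [104],                    # Content downloads
--         'event': [110, 113],                 # Event activities
--         'campaign': [24, 25],                # Campaign activities
--         'data': [12, 13],                    # Data changes
--         'engagement': [22]                   # Engagement moments
--     }
--
--     for category, type_ids in categories.items():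
--         if activity_type_id in type_ids:
--             return category
--
--     return 'other'
-- ===== SOURCE B (Python) =====
-- # B: binary search (bisect_left) over a sorted (id, category) table instead of
-- # a linear scan over category -> id-list pairs.
-- _TABLE = [
--     (1, 'web'), (2, 'form'), (3, 'web'),
--     (6, 'email'), (7, 'email'), (8, 'email'), (9, 'email'), (10, 'email'), (11, 'email'),
--     (12, 'data'), (13, 'data'),
--     (22, 'engagement'),
--     (24, 'campaign'), (25, 'campaign'),
--     (104, 'content'),
--     (110, 'event'), (113, 'event'),
-- ]
--
-- def categorize_activity(activity_type_id: int) -> str: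
--     """Categorize activity into broad types"""
--     lo, hi = 0, len(_TABLE)
--     while lo < hi:
--         mid = (lo + hi) // 2
--         if _TABLE[mid][0] < activity_type_id:
--             lo = mid + 1
--         else:
--             hi = mid
--     if lo < len(_TABLE) and _TABLE[lo][0] == activity_type_id:
--         return _TABLE[lo][1]
--     return 'other'
-- ===== Notes on version B (the rewrite author's own statement) =====
-- stated objective: alternative
-- what changed: Replaced the loop over category->id-list pairs with inner list membership scans by a hand-written binary search (bisect_left) over one sorted flat (id, category) table, correct because the ids are pairwise distinct so order/first-match cannot differ.
import Mathlib
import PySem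

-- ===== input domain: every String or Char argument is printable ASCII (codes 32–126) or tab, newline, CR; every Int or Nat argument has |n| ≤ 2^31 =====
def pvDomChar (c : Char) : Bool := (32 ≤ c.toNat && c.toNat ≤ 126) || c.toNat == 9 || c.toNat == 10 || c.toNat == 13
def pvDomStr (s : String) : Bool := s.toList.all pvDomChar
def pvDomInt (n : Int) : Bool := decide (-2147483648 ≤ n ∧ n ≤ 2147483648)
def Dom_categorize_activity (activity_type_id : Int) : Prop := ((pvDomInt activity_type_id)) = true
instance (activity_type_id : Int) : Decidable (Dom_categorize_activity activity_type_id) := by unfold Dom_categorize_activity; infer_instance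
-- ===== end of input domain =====

-- B replaces A's loop over category -> id-list pairs (inner list membership scans) by a
-- hand-written binary search over one sorted flat (id, category) table ('alternative').


-- ===== PORT A =====
-- A's category table, in insertion order (a Python dict of category -> id list).
def pvCats : List (String × List Int) :=
  [("email", [6, 7, 8, 9, 10, 11]),
   ("web", [1, 3]),
   ("form", [2]),
   ("content", [104]),
   ("event", [110, 113]),
   ("campaign", [24, 25]),
   ("data", [12, 13]),
   ("engagement", [22])]

-- the `for category, type_ids in categories.items(): if activity_type_id in type_ids: return category` loop
def pvLoopA (activity_type_id : Int) : List (String × List Int) → String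
  | [] => "other"
  | (category, type_ids) :: rest =>
      if activity_type_id ∈ type_ids then category else pvLoopA activity_type_id rest

def categorize_activity (activity_type_id : Int) : String :=
  pvLoopA activity_type_id pvCats

-- ===== PORT B =====
-- B's sorted flat (id, category) table.
def pvTable : List (Int × String) :=
  [(1, "web"), (2, "form"), (3, "web"),
   (6, "email"), (7, "email"), (8, "email"), (9, "email"), (10, "email"), (11, "email"),
   (12, "data"), (13, "data"),
   (22, "engagement"),
   (24, "campaign"), (25, "campaign"),
   (104, "content"),
   (110, "event"), (113, "event")]

-- the `while lo < hi` bisect_left loop; indices mid/lo are always in range in the Python,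
-- so getD with a default is exact here.
def pvBSearch (x : Int) (lo hi : Nat) : Nat :=
  if lo < hi then
    if (pvTable.getD ((lo + hi) / 2) (0, "other")).1 < x then pvBSearch x ((lo + hi) / 2 + 1) hi
    else pvBSearch x lo ((lo + hi) / 2)
  else lo
termination_by hi - lo
decreasing_by all_goals omega

def categorize_activity_alt (activity_type_id : Int) : String :=
  let lo := pvBSearch activity_type_id 0 pvTable.length
  if lo < pvTable.length ∧ (pvTable.getD lo (0, "other")).1 = activity_type_id then
    (pvTable.getD lo (0, "other")).2
  else "other"

-- ===== PRECONDITION & SPEC =====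
def Spec_categorize_activity (activity_type_id : Int) (out : String) : Prop := out = categorize_activity_alt activity_type_id
instance (activity_type_id : Int) (out : String) : Decidable (Spec_categorize_activity activity_type_id out) := by unfold Spec_categorize_activity; infer_instance

-- ===== CLAIM =====
def Claim_equal_categorize_activity : Prop := ∀ (activity_type_id : Int), Dom_categorize_activity activity_type_id → Spec_categorize_activity activity_type_id (categorize_activity activity_type_id)

-- ===== LEMMAS AND PROOFS =====
-- every key stored in the table is one of the 17 literal ids
lemma pvTable_key_mem (j : Nat) (hj : j < pvTable.length) :
    (pvTable.getD j (0, "other")).1 ∈ ([1, 2, 3, 6, 7, 8, 9, 10, 11, 12, 13, 22, 24, 25, 104, 110, 113] : List Int) := by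
  simp only [pvTable, List.length] at hj
  interval_cases j <;> decide

-- ===== VERDICT =====
set_option maxHeartbeats 2000000 in
theorem categorize_activity_spec : Claim_equal_categorize_activity := by
  intro x hdom
  clear hdom
  unfold Spec_categorize_activity
  by_cases h1 : x = (1 : Int);  · subst h1; simp [categorize_activity, categorize_activity_alt, pvCats, pvLoopA, pvTable, pvBSearch]
  by_cases h2 : x = (2 : Int);  · subst h2; simp [categorize_activity, categorize_activity_alt, pvCats, pvLoopA, pvTable, pvBSearch]
  by_cases h3 : x = (3 : Int);  · subst h3; simp [categorize_activity, categorize_activity_alt, pvCats, pvLoopA, pvTable, pvBSearch]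
  by_cases h6 : x = (6 : Int);  · subst h6; simp [categorize_activity, categorize_activity_alt, pvCats, pvLoopA, pvTable, pvBSearch]
  by_cases h7 : x = (7 : Int);  · subst h7; simp [categorize_activity, categorize_activity_alt, pvCats, pvLoopA, pvTable, pvBSearch]
  by_cases h8 : x = (8 : Int);  · subst h8; simp [categorize_activity, categorize_activity_alt, pvCats, pvLoopA, pvTable, pvBSearch]
  by_cases h9 : x = (9 : Int);  · subst h9; simp [categorize_activity, categorize_activity_alt, pvCats, pvLoopA, pvTable, pvBSearch]
  by_cases h10 : x = (10 : Int); · subst h10; simp [categorize_activity, categorize_activity_alt, pvCats, pvLoopA, pvTable, pvBSearch]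
  by_cases h11 : x = (11 : Int); · subst h11; simp [categorize_activity, categorize_activity_alt, pvCats, pvLoopA, pvTable, pvBSearch]
  by_cases h12 : x = (12 : Int); · subst h12; simp [categorize_activity, categorize_activity_alt, pvCats, pvLoopA, pvTable, pvBSearch]
  by_cases h13 : x = (13 : Int); · subst h13; simp [categorize_activity, categorize_activity_alt, pvCats, pvLoopA, pvTable, pvBSearch]
  by_cases h22 : x = (22 : Int); · subst h22; simp [categorize_activity, categorize_activity_alt, pvCats, pvLoopA, pvTable, pvBSearch]
  by_cases h24 : x = (24 : Int); · subst h24; simp [categorize_activity, categorize_activity_alt, pvCats, pvLoopA, pvTable, pvBSearch]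
  by_cases h25 : x = (25 : Int); · subst h25; simp [categorize_activity, categorize_activity_alt, pvCats, pvLoopA, pvTable, pvBSearch]
  by_cases h104 : x = (104 : Int); · subst h104; simp [categorize_activity, categorize_activity_alt, pvCats, pvLoopA, pvTable, pvBSearch]
  by_cases h110 : x = (110 : Int); · subst h110; simp [categorize_activity, categorize_activity_alt, pvCats, pvLoopA, pvTable, pvBSearch]
  by_cases h113 : x = (113 : Int); · subst h113; simp [categorize_activity, categorize_activity_alt, pvCats, pvLoopA, pvTable, pvBSearch]
  -- x matches no id: A falls through its loop; B's final key check fails whatever lo the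
  -- binary search lands on, so both return "other".
  have hA : categorize_activity x = "other" := by
    simp [categorize_activity, pvCats, pvLoopA,
      h1, h2, h3, h6, h7, h8, h9, h10, h11, h12, h13, h22, h24, h25, h104, h110, h113]
  have hB : categorize_activity_alt x = "other" := by
    unfold categorize_activity_alt
    rw [if_neg]
    rintro ⟨hlt, hkey⟩
    have hm := pvTable_key_mem (pvBSearch x 0 pvTable.length) hlt
    rw [hkey] at hm
    simp only [List.mem_cons, List.not_mem_nil, or_false] at hm
    rcases hm with h|h|h|h|h|h|h|h|h|h|h|h|h|h|h|h|h <;> simp_all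
  rw [hA, hB]
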